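-- pv_equiv track=rewrite | github.com/batt1984rodrigo-del/tcria | generate_case_timeline.py | compute_next_actions
-- ===== SOURCE A (Python) =====
-- from typing import Any, Dict, List, Tuple
--
-- def compute_next_actions(entries: List[Dict[str, Any]]) -> List[str]:
--     blocked_top = sum(1 for e in entries if "BLOCKED" in str(e.get("overall_outcome", "")).upper())
--     low_conf = sum(1 for e in entries if str(e.get("timeline_confidence")) == "low")
--     actions: List[str] = []
--
--     if blocked_top:
--         actions.append("Sanear metadados/governanca dos itens bloqueados com maior sinal temporal antes de montar narrativa final.")
--     if low_conf:
--         actions.append("Reforcar extracao de datas nos itens de baixa confianca com OCR/revisao humana para aumentar qualidade da linha do tempo.")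
--     actions.append("Validar manualmente os eventos-chave dos 5 primeiros itens antes de uso em peticao/relatorio.")
--     return actions
-- ===== SOURCE B (Python) =====
-- from typing import Any, Dict, List
--
-- def compute_next_actions(entries: List[Dict[str, Any]]) -> List[str]:
--     has_blocked = False
--     has_low_conf = False
--     for e in entries:
--         if not has_blocked and "BLOCKED" in str(e.get("overall_outcome", "")).upper():
--             has_blocked = True
--         if not has_low_conf and str(e.get("timeline_confidence")) == "low":
--             has_low_conf = True
--         if has_blocked and has_low_conf:
--             break
--     actions: List[str] = []
--     if has_blocked:
--         actions.append("Sanear metadados/governanca dos itens bloqueados com maior sinal temporal antes de montar narrativa final.")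
--     if has_low_conf:
--         actions.append("Reforcar extracao de datas nos itens de baixa confianca com OCR/revisao humana para aumentar qualidade da linha do tempo.")
--     actions.append("Validar manualmente os eventos-chave dos 5 primeiros itens antes de uso em peticao/relatorio.")
--     return actions
-- ===== Notes on version B (the rewrite author's own statement) =====
-- stated objective: alternative
-- what changed: Replaced the two full counting scans (two sum(...) comprehensions) with a single short-circuiting pass maintaining two booleans that breaks as soon as both flags are set; the flags replace the counts in the truthiness tests.
import Mathlib
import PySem

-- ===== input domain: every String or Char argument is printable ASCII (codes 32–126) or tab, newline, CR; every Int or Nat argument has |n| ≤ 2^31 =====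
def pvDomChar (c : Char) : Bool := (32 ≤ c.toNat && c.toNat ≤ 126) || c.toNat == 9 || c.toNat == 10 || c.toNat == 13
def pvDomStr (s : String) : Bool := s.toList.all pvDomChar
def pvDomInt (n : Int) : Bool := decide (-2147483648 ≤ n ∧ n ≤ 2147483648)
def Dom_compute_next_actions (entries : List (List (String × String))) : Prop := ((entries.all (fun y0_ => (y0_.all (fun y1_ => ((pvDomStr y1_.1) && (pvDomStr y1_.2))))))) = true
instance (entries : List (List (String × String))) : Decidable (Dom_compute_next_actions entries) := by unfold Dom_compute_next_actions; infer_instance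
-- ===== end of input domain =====

-- B replaces A's two full counting scans by one short-circuiting pass keeping two booleans (alternative decomposition, no speed claim).


-- ===== PORT A =====
-- str(e.get("overall_outcome","")) / str(e.get("timeline_confidence")): values are strings, missing key gives "" / "None".
def pvBlockedP (e : List (String × String)) : Bool :=
  PySem.Str.isIn "BLOCKED" (PySem.Str.upper (PySem.Dict.getD ⟨e⟩ "overall_outcome" ""))

def pvLowP (e : List (String × String)) : Bool :=
  PySem.Dict.getD ⟨e⟩ "timeline_confidence" "None" == "low"

def compute_next_actions (entries : List (List (String × String))) : List String :=
  let blocked_top : Nat := entries.foldl (fun acc e => if pvBlockedP e then acc + 1 else acc) 0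
  let low_conf : Nat := entries.foldl (fun acc e => if pvLowP e then acc + 1 else acc) 0
  let actions : List String := []
  let actions := if blocked_top ≠ 0 then actions ++ ["Sanear metadados/governanca dos itens bloqueados com maior sinal temporal antes de montar narrativa final."] else actions
  let actions := if low_conf ≠ 0 then actions ++ ["Reforcar extracao de datas nos itens de baixa confianca com OCR/revisao humana para aumentar qualidade da linha do tempo."] else actions
  actions ++ ["Validar manualmente os eventos-chave dos 5 primeiros itens antes de uso em peticao/relatorio."]

-- ===== PORT B =====
-- single pass with two flags, breaking once both are set
def pvScanFlags : List (List (String × String)) → Bool → Bool → Bool × Bool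
  | [], hb, hl => (hb, hl)
  | e :: t, hb, hl =>
    let hb := hb || (!hb && pvBlockedP e)
    let hl := hl || (!hl && pvLowP e)
    if hb && hl then (hb, hl) else pvScanFlags t hb hl

def compute_next_actions_alt (entries : List (List (String × String))) : List String :=
  let (has_blocked, has_low_conf) := pvScanFlags entries false false
  let actions : List String := []
  let actions := if has_blocked then actions ++ ["Sanear metadados/governanca dos itens bloqueados com maior sinal temporal antes de montar narrativa final."] else actions
  let actions := if has_low_conf then actions ++ ["Reforcar extracao de datas nos itens de baixa confianca com OCR/revisao humana para aumentar qualidade da linha do tempo."] else actions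
  actions ++ ["Validar manualmente os eventos-chave dos 5 primeiros itens antes de uso em peticao/relatorio."]

-- ===== PRECONDITION & SPEC =====
def Spec_compute_next_actions (entries : List (List (String × String))) (out : List String) : Prop := out = compute_next_actions_alt entries
instance (entries : List (List (String × String))) (out : List String) : Decidable (Spec_compute_next_actions entries out) := by unfold Spec_compute_next_actions; infer_instance

-- ===== CLAIM (what is proved, stated in full; the proofs are below) =====
def Claim_equal_compute_next_actions : Prop := ∀ (entries : List (List (String × String))), Dom_compute_next_actions entries → Spec_compute_next_actions entries (compute_next_actions entries)

-- ===== LEMMAS AND PROOFS =====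
theorem pvScanFlags_eq (t : List (List (String × String))) (hb hl : Bool) :
    pvScanFlags t hb hl = (hb || t.any pvBlockedP, hl || t.any pvLowP) := by
  induction t generalizing hb hl with
  | nil => simp [pvScanFlags]
  | cons e t ih =>
    simp only [pvScanFlags, List.any_cons]
    split
    · rename_i h
      cases hb <;> cases hl <;> simp_all
    · rw [ih]
      cases hb <;> cases hl <;> simp

theorem pvCount_ne_zero (p : List (String × String) → Bool)
    (t : List (List (String × String))) (n : Nat) :
    (t.foldl (fun acc e => if p e then acc + 1 else acc) n ≠ 0) = (n ≠ 0 ∨ t.any p = true) := by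
  induction t generalizing n with
  | nil => simp
  | cons e t ih =>
    simp only [List.foldl_cons, List.any_cons, ih]
    by_cases h : p e = true <;> simp [h]

-- ===== VERDICT (by name: the statement is the Claim_ definition above) =====
theorem compute_next_actions_spec : Claim_equal_compute_next_actions := by
  intro entries _
  unfold Spec_compute_next_actions compute_next_actions compute_next_actions_alt
  rw [pvScanFlags_eq]
  simp only [Bool.false_or]
  by_cases hb : entries.any pvBlockedP = true <;>
    by_cases hl : entries.any pvLowP = true <;>
      simp [pvCount_ne_zero, hb, hl]
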